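-- pv_equiv track=rewrite | github.com/ayosprakob/ayosprakob.github.io | armillary_interface/main.py | count_irreducible_components
-- ===== SOURCE A (Python) =====
-- def count_irreducible_components(paths):
-- 	multiplicity = {}
-- 	for path in paths:
-- 		component = path.split("->")[-1].split("(")[0]
-- 		if component in multiplicity:
-- 			multiplicity[component] += 1
-- 		else:
-- 			multiplicity[component] = 1
-- 	return multiplicity
-- ===== SOURCE B (Python) =====
-- def count_irreducible_components(paths):
-- 	comps = [path.split("->")[-1].split("(")[0] for path in paths]
-- 	result = {}
-- 	while comps:
-- 		head = comps[0]
-- 		rest = [c for c in comps if c != head]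
-- 		result[head] = len(comps) - len(rest)
-- 		comps = rest
-- 	return result
-- ===== Notes on version B (the rewrite author's own statement) =====
-- stated objective: alternative
-- what changed: Replaces the single-pass dict-of-counts accumulation by a partition-and-remove loop: repeatedly take the first remaining name, filter out all its occurrences, and record the length drop as its count, shrinking the worklist until empty.
import Mathlib
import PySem

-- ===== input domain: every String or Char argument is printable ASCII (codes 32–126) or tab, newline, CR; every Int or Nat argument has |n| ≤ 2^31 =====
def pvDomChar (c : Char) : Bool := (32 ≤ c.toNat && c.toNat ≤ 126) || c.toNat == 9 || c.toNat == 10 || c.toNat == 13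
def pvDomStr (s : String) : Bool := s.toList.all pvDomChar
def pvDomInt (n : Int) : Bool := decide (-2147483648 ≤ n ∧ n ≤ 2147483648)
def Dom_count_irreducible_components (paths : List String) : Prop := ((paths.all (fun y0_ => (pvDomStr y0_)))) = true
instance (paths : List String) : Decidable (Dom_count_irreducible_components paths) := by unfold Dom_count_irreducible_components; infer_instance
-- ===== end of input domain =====

-- B replaces the running dict-of-counts by a partition-and-remove loop (count = length drop after filtering
-- out the head name); alternative decomposition, not faster.

-- ===== PORT A =====
-- shared helper: path.split("->")[-1].split("(")[0] (identical expression in both Pythons)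
-- split? returns some for the nonempty separators "->" and "("; .getD [] never fires
def pvComponent (path : String) : String :=
  PySem.List.pyGetD
    ((PySem.Str.split? (PySem.List.pyGetD ((PySem.Str.split? path "->").getD []) (-1) "") "(").getD [])
    0 ""

def count_irreducible_components (paths : List String) : List (String × Int) :=
  (paths.foldl (fun (m : PySem.Dict String Int) path =>
      let c := pvComponent path
      if m.contains c then m.insert c (m.getD c 0 + 1) else m.insert c 1)
    PySem.Dict.empty).items

-- ===== PORT B =====
-- the while loop of Source B: head = comps[0]; rest = comps without head's occurrences;
-- result[head] = len(comps) - len(rest); comps = rest.  Each head key is fresh (all its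
-- occurrences were just removed), so the dict grows by appending (head, count): the items
-- list is built directly by this recursion.
def pvAltLoop : List String → List (String × Int)
  | [] => []
  | head :: cs =>
    let rest := (head :: cs).filter (fun x => x ≠ head)
    (head, ((head :: cs).length : Int) - (rest.length : Int)) :: pvAltLoop rest
termination_by l => l.length
decreasing_by
  simp only [List.filter_cons]
  simpa using Nat.lt_succ_of_le (List.length_filter_le _ _)

def count_irreducible_components_alt (paths : List String) : List (String × Int) :=
  pvAltLoop (paths.map pvComponent)

-- ===== PRECONDITION & SPEC =====
def Spec_count_irreducible_components (paths : List String) (out : List (String × Int)) : Prop := out = count_irreducible_components_alt paths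
instance (paths : List String) (out : List (String × Int)) : Decidable (Spec_count_irreducible_components paths out) := by unfold Spec_count_irreducible_components; infer_instance

-- ===== CLAIM (what is proved, stated in full; the proofs are below) =====
def Claim_equal_count_irreducible_components : Prop := ∀ (paths : List String), Dom_count_irreducible_components paths → Spec_count_irreducible_components paths (count_irreducible_components paths)

-- ===== LEMMAS AND PROOFS =====

-- the branched update of A equals the unconditional counter update
lemma pv_step_eq (m : PySem.Dict String Int) (c : String) :
    (if m.contains c then m.insert c (m.getD c 0 + 1) else m.insert c 1)
      = m.insert c (m.getD c 0 + 1) := by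
  by_cases h : m.contains c = true
  · simp [h]
  · have hc : (m.get? c).isSome = false := by
      rw [← PySem.Dict.contains_eq_isSome_get?]; simpa using h
    have hn : m.get? c = none := by cases hg : m.get? c <;> simp [hg] at hc ⊢
    simp [h, PySem.Dict.getD, hn]

-- Set.ofList as a fold from an arbitrary accumulator: the new elements are those of l not
-- already in acc, deduped, appended in first-occurrence order (proved by strong induction on length)
lemma pv_foldl_add_eq : ∀ (n : Nat) (l acc : List String), l.length ≤ n →
    l.foldl PySem.Set.add acc
      = acc ++ PySem.Set.ofList (l.filter (fun y => !acc.contains y)) := by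
  intro n
  induction n with
  | zero =>
    intro l acc hl
    have : l = [] := List.eq_nil_of_length_eq_zero (Nat.le_zero.mp hl)
    subst this; simp [PySem.Set.ofList]
  | succ n ih =>
    intro l acc hl
    cases l with
    | nil => simp [PySem.Set.ofList]
    | cons x t =>
      have ht : t.length ≤ n := Nat.le_of_succ_le_succ hl
      by_cases hx : acc.contains x = true
      · have hadd : PySem.Set.add acc x = acc := by
          simp [PySem.Set.add, List.mem_of_elem_eq_true hx]
        simp only [List.foldl_cons, List.filter_cons, hx, Bool.not_true, hadd]
        exact ih t acc ht
      · have hxmem : x ∉ acc := fun h => hx (List.elem_eq_true_of_mem h)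
        have hadd : PySem.Set.add acc x = acc ++ [x] := by
          simp [PySem.Set.add, hxmem]
        simp only [List.foldl_cons, List.filter_cons, hx, Bool.not_false, if_true, hadd]
        rw [ih t (acc ++ [x]) ht]
        have hof : PySem.Set.ofList (x :: t.filter (fun y => !acc.contains y))
            = [x] ++ PySem.Set.ofList ((t.filter (fun y => !acc.contains y)).filter
                (fun y => !([x] : List String).contains y)) := by
          have hlen : (t.filter (fun y => !acc.contains y)).length ≤ n :=
            le_trans (List.length_filter_le _ _) ht
          have hstep : PySem.Set.ofList (x :: t.filter (fun y => !acc.contains y))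
              = (t.filter (fun y => !acc.contains y)).foldl PySem.Set.add [x] := by
            simp [PySem.Set.ofList, PySem.Set.add, PySem.Set.empty]
          rw [hstep, ih _ [x] hlen]
        rw [hof, List.filter_filter]
        have hfeq : (fun y => !(acc ++ [x]).contains y)
            = (fun y => !([x] : List String).contains y && !acc.contains y) := by
          funext y
          by_cases h1 : y = x <;> by_cases h2 : y ∈ acc <;> simp [h1, h2]
        rw [hfeq, List.append_assoc]

-- first-occurrence dedup: head, then dedup of the tail with head's occurrences removed
lemma pv_ofList_cons (c : String) (cs : List String) :
    PySem.Set.ofList (c :: cs) = c :: PySem.Set.ofList (cs.filter (fun x => x ≠ c)) := by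
  have hstep : PySem.Set.ofList (c :: cs) = cs.foldl PySem.Set.add [c] := by
    simp [PySem.Set.ofList, PySem.Set.add, PySem.Set.empty]
  rw [hstep, pv_foldl_add_eq cs.length cs [c] le_rfl]
  have h : (fun y => !([c] : List String).contains y) = (fun x : String => decide (x ≠ c)) := by
    funext y; by_cases h : y = c <;> simp [h]
  rw [h]; rfl

-- removing every occurrence of c shortens the list by exactly its multiplicity
lemma pv_count_filter_len (c : String) (cs : List String) :
    cs.count c + (cs.filter (fun x => x ≠ c)).length = cs.length := by
  induction cs with
  | nil => simp
  | cons a t ih =>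
    by_cases h : a = c
    · subst h
      simp only [List.count_cons_self, List.filter_cons, List.length_cons]
      rw [if_neg (by simp)]
      omega
    · rw [List.count_cons_of_ne h]
      simp only [List.filter_cons]
      rw [if_pos (by simpa using h)]
      simp only [List.length_cons]
      omega

-- the partition loop computes exactly (first-occurrence names, their multiplicities)
lemma pv_altLoop_eq_aux : ∀ (n : Nat) (l : List String), l.length ≤ n →
    pvAltLoop l = (PySem.Set.ofList l).map (fun c => (c, (l.count c : Int))) := by
  intro n
  induction n with
  | zero =>
    intro l hl
    have : l = [] := List.eq_nil_of_length_eq_zero (Nat.le_zero.mp hl)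
    subst this; simp [pvAltLoop, PySem.Set.ofList]
  | succ n ih =>
    intro l hl
    cases l with
    | nil => simp [pvAltLoop, PySem.Set.ofList]
    | cons c cs =>
      have ht : cs.length ≤ n := Nat.le_of_succ_le_succ hl
      have hrest : (c :: cs).filter (fun x => x ≠ c) = cs.filter (fun x => x ≠ c) := by
        simp
      have hlenr : (cs.filter (fun x => x ≠ c)).length ≤ n :=
        le_trans (List.length_filter_le _ _) ht
      rw [pvAltLoop, hrest, ih _ hlenr, pv_ofList_cons]
      simp only [List.map_cons]
      congr 1
      · -- head pair: length drop = count of c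
        have hcount := pv_count_filter_len c cs
        have hc : (c :: cs).count c = cs.count c + 1 := by simp
        simp only [hc]
        have : ((c :: cs).length : Int) - ((cs.filter (fun x => x ≠ c)).length : Int)
            = ((cs.count c + 1 : Nat) : Int) := by
          simp only [List.length_cons]; push_cast; omega
        rw [this]
      · -- tail: counts are unchanged by removing c, for names ≠ c
        apply List.map_congr_left
        intro x hx
        have hxmem : x ∈ cs.filter (fun y => y ≠ c) := by
          have h := PySem.Set.mem_ofList (xs := cs.filter (fun y => y ≠ c)) (y := x)
          exact h.mp hx
        have hxc : x ≠ c := by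
          have := List.of_mem_filter hxmem
          simpa using this
        have h1 : (cs.filter (fun y => y ≠ c)).count x = cs.count x :=
          List.count_filter (by simpa using hxc)
        have h2 : (c :: cs).count x = cs.count x := by
          rw [List.count_cons_of_ne hxc.symm]
        simp only [h1, h2]

lemma pv_altLoop_eq (l : List String) :
    pvAltLoop l = (PySem.Set.ofList l).map (fun c => (c, (l.count c : Int))) :=
  pv_altLoop_eq_aux l.length l le_rfl

-- ===== VERDICT (by name: the statement is the Claim_ definition above) =====
theorem count_irreducible_components_spec : Claim_equal_count_irreducible_components := by
  intro paths _
  unfold Spec_count_irreducible_components count_irreducible_components count_irreducible_components_alt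
  have h1 : paths.foldl (fun (m : PySem.Dict String Int) path =>
      let c := pvComponent path
      if m.contains c then m.insert c (m.getD c 0 + 1) else m.insert c 1) PySem.Dict.empty
      = (paths.map pvComponent).foldl (fun m c => m.insert c (m.getD c 0 + 1)) PySem.Dict.empty := by
    rw [List.foldl_map]
    exact PySem.List.foldl_congr_mem _ _ _ _ (fun acc x _ => pv_step_eq acc (pvComponent x))
  rw [h1, PySem.Dict.foldl_insert_getD_add_one_eq_counter, PySem.Dict.items_counter,
    pv_altLoop_eq]
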